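-- pv_equiv track=rewrite | github.com/Chaeng-Ploypaphat-S/ds-algo | premium_only/string/leetcode_3581.py | countOddLetters
-- ===== SOURCE A (Python) =====
-- from collections import defaultdict
--
-- def countOddLetters(n: int) -> int:
--     count_num = defaultdict(int)
--     while n > 0:
--         curr_digit = int(n % 10)
--         count_num[curr_digit] += 1
--         n //= 10
--
--     char_counts = defaultdict(int)
--     def update_char_counts(num_str, frequency):
--         for char in num_str:
--             char_counts[char] += frequency
--
--     num_map = {
--         0: 'zero',
--         1: 'one',
--         2: 'two',
--         3: 'three',
--         4: 'four',
--         5: 'five',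
--         6: 'six',
--         7: 'seven',
--         8: 'eight',
--         9: 'nine'
--     }
--
--     for number, frequency in count_num.items():
--         update_char_counts(num_map[number], frequency)
--
--     count_odd = 0
--     for count in char_counts.values():
--         if count % 2 == 1:
--             count_odd += 1
--
--     return count_odd
-- ===== SOURCE B (Python) =====
-- NUM_MAP = {
--     0: 'zero', 1: 'one', 2: 'two', 3: 'three', 4: 'four',
--     5: 'five', 6: 'six', 7: 'seven', 8: 'eight', 9: 'nine'
-- }
--
-- def countOddLetters(n: int) -> int:
--     # Single pass: toggle each spelled-out character in a parity set;
--     # a character is in `odd` iff it has been seen an odd number of times.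
--     odd = set()
--     while n > 0:
--         for ch in NUM_MAP[n % 10]:
--             if ch in odd:
--                 odd.discard(ch)
--             else:
--                 odd.add(ch)
--         n //= 10
--     return len(odd)
-- ===== Notes on version B (the rewrite author's own statement) =====
-- stated objective: simpler
-- what changed: Replaces A's two defaultdict counting passes (digit frequencies, then per-character frequencies) and the final odd-value scan with a single pass that toggles each spelled-out character in a parity set and returns the set's size.
import Mathlib
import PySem

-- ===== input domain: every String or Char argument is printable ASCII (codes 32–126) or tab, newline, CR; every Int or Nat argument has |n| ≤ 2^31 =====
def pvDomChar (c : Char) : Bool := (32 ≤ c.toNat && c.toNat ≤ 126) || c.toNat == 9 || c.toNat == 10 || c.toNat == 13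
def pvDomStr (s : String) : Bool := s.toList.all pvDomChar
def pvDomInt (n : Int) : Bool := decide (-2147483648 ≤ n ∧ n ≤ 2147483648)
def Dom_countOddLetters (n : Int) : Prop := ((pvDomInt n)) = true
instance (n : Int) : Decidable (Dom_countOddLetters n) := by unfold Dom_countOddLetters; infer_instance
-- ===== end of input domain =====

-- B replaces A's two counting dicts and odd-value scan with one parity-set pass: same result, simpler.

-- ===== PORT A =====
-- the num_map dict literal (shared by both ports as data)
def pvNumMap : PySem.Dict Int String := PySem.Dict.ofList
  [(0, "zero"), (1, "one"), (2, "two"), (3, "three"), (4, "four"),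
   (5, "five"), (6, "six"), (7, "seven"), (8, "eight"), (9, "nine")]

-- termination fact for the 'while n > 0: … n //= 10' loops of both Pythons
theorem pvFloordiv10_lt (n : Int) (h : n > 0) :
    (PySem.Int.floordiv n 10).toNat < n.toNat := by
  simp only [PySem.Int.floordiv, Int.fdiv_eq_ediv]
  have h10 : (0:Int) ≤ 10 := by norm_num
  simp only [h10, true_or, if_true]
  omega

-- 'while n > 0: count_num[n % 10] += 1; n //= 10' (defaultdict(int))
def pvCountLoopA (n : Int) (d : PySem.Dict Int Int) : PySem.Dict Int Int :=
  if h : n > 0 then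
    pvCountLoopA (PySem.Int.floordiv n 10) (d.modify (PySem.Int.mod n 10) 0 (· + 1))
  else d
termination_by n.toNat
decreasing_by exact pvFloordiv10_lt n h

def countOddLetters (n : Int) : Int :=
  let count_num := pvCountLoopA n PySem.Dict.empty
  -- num_map[number]: the keys reached are exactly n % 10 with n > 0, i.e. 0–9,
  -- all present in num_map, so the KeyError branch (get? = none) is unreachable; getD "" is that lookup.
  let char_counts := count_num.items.foldl
    (fun cc p => ((pvNumMap.get? p.1).getD "").toList.foldl
        (fun cc ch => cc.modify ch 0 (· + p.2)) cc)
    PySem.Dict.empty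
  char_counts.values.foldl (fun acc v => if PySem.Int.mod v 2 = 1 then acc + 1 else acc) 0

-- ===== PORT B =====
-- 'if ch in odd: odd.discard(ch) else: odd.add(ch)'
def pvToggle (s : PySem.Set Char) (c : Char) : PySem.Set Char :=
  if PySem.Set.contains s c then PySem.Set.discard s c else PySem.Set.add s c

-- 'while n > 0: for ch in NUM_MAP[n % 10]: toggle; n //= 10'
def pvOddLoopB (n : Int) (odd : PySem.Set Char) : PySem.Set Char :=
  if h : n > 0 then
    pvOddLoopB (PySem.Int.floordiv n 10)
      (((pvNumMap.get? (PySem.Int.mod n 10)).getD "").toList.foldl pvToggle odd)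
  else odd
termination_by n.toNat
decreasing_by exact pvFloordiv10_lt n h

def countOddLetters_alt (n : Int) : Int :=
  PySem.Set.len (pvOddLoopB n PySem.Set.empty)

-- ===== PRECONDITION & SPEC =====
def Spec_countOddLetters (n : Int) (out : Int) : Prop := out = countOddLetters_alt n
instance (n : Int) (out : Int) : Decidable (Spec_countOddLetters n out) := by unfold Spec_countOddLetters; infer_instance

-- ===== CLAIM (what is proved, stated in full; the proofs are below) =====
def Claim_equal_countOddLetters : Prop := ∀ (n : Int), Dom_countOddLetters n → Spec_countOddLetters n (countOddLetters n)

-- ===== LEMMAS AND PROOFS =====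

-- the digit sequence extracted by the shared while-loop, least significant first
def pvDigits (n : Int) : List Int :=
  if h : n > 0 then PySem.Int.mod n 10 :: pvDigits (PySem.Int.floordiv n 10) else []
termination_by n.toNat
decreasing_by exact pvFloordiv10_lt n h

-- the characters of num_map[d]
def pvW (d : Int) : List Char := ((pvNumMap.get? d).getD "").toList

-- all spelled-out characters of n
def pvChars (n : Int) : List Char := (pvDigits n).flatMap pvW

theorem pvCountLoopA_eq (n : Int) (d : PySem.Dict Int Int) :
    pvCountLoopA n d = (pvDigits n).foldl (fun d x => d.modify x 0 (· + 1)) d := by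
  induction n, d using pvCountLoopA.induct with
  | case1 n d h ih =>
    rw [pvCountLoopA, pvDigits]
    simp only [dif_pos h, List.foldl_cons]
    exact ih
  | case2 n d h =>
    rw [pvCountLoopA, pvDigits]
    simp only [dif_neg h, List.foldl_nil]

theorem pvOddLoopB_eq (n : Int) (s : PySem.Set Char) :
    pvOddLoopB n s = (pvChars n).foldl pvToggle s := by
  induction n, s using pvOddLoopB.induct with
  | case1 n s h ih =>
    rw [pvOddLoopB]
    simp only [dif_pos h]
    unfold pvChars at ih ⊢
    conv_rhs => rw [pvDigits]
    simp only [dif_pos h, List.flatMap_cons, List.foldl_append, pvW]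
    exact ih
  | case2 n s h =>
    rw [pvOddLoopB]
    simp only [dif_neg h]
    unfold pvChars
    rw [pvDigits]
    simp only [dif_neg h, List.flatMap_nil, List.foldl_nil]

-- A side: getD of the inner char loop
theorem pvInner_getD (l : List Char) (f : Int) (d : PySem.Dict Char Int) (c : Char) :
    ((l.foldl (fun d x => d.modify x 0 (· + f)) d)).getD c 0
      = d.getD c 0 + f * (l.count c : Int) := by
  induction l generalizing d with
  | nil => simp
  | cons x t ih =>
    simp only [List.foldl_cons]
    rw [ih, PySem.Dict.getD_modify]
    by_cases hc : c = x
    · subst hc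
      simp only [if_pos rfl, List.count_cons_self]
      push_cast
      ring
    · simp [hc, List.count_cons, Ne.symm hc]

-- A side: getD of the whole char_counts fold
theorem pvCC_getD (ps : List (Int × Int)) (d : PySem.Dict Char Int) (c : Char) :
    (ps.foldl (fun cc p => (pvW p.1).foldl (fun cc ch => cc.modify ch 0 (· + p.2)) cc) d).getD c 0
      = d.getD c 0 + (ps.map (fun p => p.2 * ((pvW p.1).count c : Int))).sum := by
  induction ps generalizing d with
  | nil => simp
  | cons p t ih =>
    simp only [List.foldl_cons, List.map_cons, List.sum_cons]
    rw [ih, pvInner_getD]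
    ring

-- grouping: summing g over ds equals summing count·g over the distinct elements
theorem pvSum_group (ds : List Int) (g : Int → ℕ) :
    ((PySem.Set.ofList ds).map (fun k => ((ds.count k : Int)) * (g k : Int))).sum
      = ((ds.map g).sum : Int) := by
  have hnd : (PySem.Set.ofList ds).Nodup := PySem.Set.nodup_ofList ds
  have htf : (PySem.Set.ofList ds).toFinset = ds.toFinset := by
    ext a
    simp [PySem.Set.mem_ofList]
  rw [← List.sum_toFinset _ hnd, htf, Nat.cast_list_sum, List.map_map,
    Finset.sum_list_map_count]
  refine Finset.sum_congr rfl fun m _ => ?_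
  simp [nsmul_eq_mul, Function.comp]

-- A side: keys of the char_counts fold
theorem pvCC_keys (ps : List (Int × Int)) (d : PySem.Dict Char Int) :
    (ps.foldl (fun cc p => (pvW p.1).foldl (fun cc ch => cc.modify ch 0 (· + p.2)) cc) d).keys
      = PySem.Set.update d.keys (ps.flatMap (fun p => pvW p.1)) := by
  induction ps generalizing d with
  | nil => simp [PySem.Set.update_nil]
  | cons p t ih =>
    simp only [List.foldl_cons, List.flatMap_cons]
    rw [ih, PySem.Dict.keys_foldl_modify, PySem.Set.update_append]

-- A side: the final values loop is a countP
theorem pvFold_count (l : List Int) (a : Int) :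
    l.foldl (fun acc v => if PySem.Int.mod v 2 = 1 then acc + 1 else acc) a
      = a + (l.countP (fun v => decide (PySem.Int.mod v 2 = 1)) : Int) := by
  induction l generalizing a with
  | nil => simp
  | cons v t ih =>
    simp only [List.foldl_cons, List.countP_cons]
    rw [ih]
    by_cases hv : PySem.Int.mod v 2 = 1 <;> simp [hv] <;> push_cast <;> omega

-- B side: membership and nodup through the toggle fold
theorem pvToggle_foldl (l : List Char) (s : PySem.Set Char) (hs : s.Nodup) :
    (l.foldl pvToggle s).Nodup ∧
      ∀ c, (c ∈ l.foldl pvToggle s ↔ ((c ∈ s) ↔ l.count c % 2 = 0)) := by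
  induction l generalizing s with
  | nil => exact ⟨hs, fun c => by simp⟩
  | cons x t ih =>
    have hstep : (pvToggle s x).Nodup := by
      unfold pvToggle
      split
      · exact PySem.Set.nodup_discard s x hs
      · exact PySem.Set.nodup_add s x hs
    have hmem : ∀ c, c ∈ pvToggle s x ↔ (if c = x then c ∉ s else c ∈ s) := by
      intro c
      unfold pvToggle
      split
      · next hcont =>
        have hx : x ∈ s := (PySem.Set.contains_iff s x).mp hcont
        rw [PySem.Set.mem_discard]
        by_cases hc : c = x <;> simp [hc, hx]
      · next hcont =>
        have hx : x ∉ s := fun hxs => hcont ((PySem.Set.contains_iff s x).mpr hxs)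
        rw [PySem.Set.mem_add]
        by_cases hc : c = x <;> simp [hc, hx]
    obtain ⟨hnd, hm⟩ := ih (pvToggle s x) hstep
    refine ⟨hnd, fun c => ?_⟩
    rw [List.foldl_cons, hm c, hmem c]
    by_cases hc : c = x
    · subst hc
      simp only [if_pos rfl, List.count_cons_self]
      by_cases hcs : c ∈ s <;> simp [hcs] <;> omega
    · simp [hc, List.count_cons, Ne.symm hc]

theorem countOddLetters_eq_alt (n : Int) : countOddLetters n = countOddLetters_alt n := by
  unfold countOddLetters countOddLetters_alt
  rw [pvCountLoopA_eq, pvOddLoopB_eq, ← PySem.Dict.counter_eq_foldl]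
  simp only [← pvW.eq_def]
  unfold pvChars
  generalize pvDigits n = ds
  set L : List Char := ds.flatMap pvW with hL
  set cc : PySem.Dict Char Int :=
    (PySem.Dict.counter ds).items.foldl
      (fun cc p => (pvW p.1).foldl (fun cc ch => cc.modify ch 0 (· + p.2)) cc)
      PySem.Dict.empty with hcc
  -- keys of char_counts
  have hkeys : cc.keys = PySem.Set.ofList ((PySem.Set.ofList ds).flatMap pvW) := by
    rw [hcc, pvCC_keys, PySem.Dict.keys_empty, PySem.Set.update_nil_left,
      PySem.Dict.items_counter, List.flatMap_map]
  have hKnd : cc.keys.Nodup := by rw [hkeys]; exact PySem.Set.nodup_ofList _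
  have hKmem : ∀ c, c ∈ cc.keys ↔ c ∈ L := by
    intro c
    rw [hkeys, PySem.Set.mem_ofList, hL]
    simp only [List.mem_flatMap, PySem.Set.mem_ofList]
  -- getD of char_counts counts characters of L
  have hgetD : ∀ c, cc.getD c 0 = (L.count c : Int) := by
    intro c
    rw [hcc, pvCC_getD, PySem.Dict.getD_empty, PySem.Dict.items_counter, List.map_map]
    have : ((PySem.Set.ofList ds).map
        ((fun p => p.2 * ((pvW p.1).count c : Int)) ∘ fun k => (k, (ds.count k : Int)))).sum
        = ((PySem.Set.ofList ds).map (fun k => ((ds.count k : Int)) * (((pvW k).count c : ℕ) : Int))).sum := by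
      simp [Function.comp_def]
    rw [this, pvSum_group ds (fun k => (pvW k).count c), hL, List.count_flatMap]
    simp [Function.comp_def]
  -- A's value: a countP over the keys
  rw [PySem.Dict.values_eq_map_keys cc hKnd 0, pvFold_count, List.countP_map, zero_add]
  -- B's set
  obtain ⟨hSnd, hSmem⟩ := pvToggle_foldl L PySem.Set.empty List.nodup_nil
  have hSmem' : ∀ c, c ∈ L.foldl pvToggle PySem.Set.empty ↔ L.count c % 2 = 1 := by
    intro c
    rw [hSmem c]
    have hne : ¬(c ∈ PySem.Set.empty) := by simp [PySem.Set.empty]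
    constructor
    · intro h
      by_contra hodd
      have he : L.count c % 2 = 0 := by omega
      exact hne (h.mpr he)
    · intro h1
      constructor
      · intro hmem
        exact absurd hmem hne
      · intro he
        exact absurd he (by omega)
  have hq : cc.keys.countP ((fun v => decide (PySem.Int.mod v 2 = 1)) ∘ fun k => cc.getD k 0)
      = cc.keys.countP (fun c => decide (L.count c % 2 = 1)) := by
    refine List.countP_congr fun c _ => ?_
    simp only [Function.comp_apply, hgetD c, PySem.Int.mod, Int.fmod_eq_emod,
      decide_eq_true_eq]
    rw [if_pos (Or.inl (by norm_num : (0:Int) ≤ 2))]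
    constructor <;> intro <;> omega
  rw [hq, List.countP_eq_length_filter]
  have hperm : (cc.keys.filter (fun c => decide (L.count c % 2 = 1))).Perm
      (L.foldl pvToggle PySem.Set.empty) := by
    refine (List.perm_ext_iff_of_nodup (hKnd.filter _) hSnd).mpr fun c => ?_
    simp only [List.mem_filter, hKmem c, hSmem' c, decide_eq_true_eq]
    constructor
    · rintro ⟨-, h⟩
      exact h
    · intro h
      exact ⟨List.count_pos_iff.mp (by omega), h⟩
  rw [hperm.length_eq]
  simp [PySem.Set.len]

-- ===== VERDICT (by name: the statement is the Claim_ definition above) =====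
theorem countOddLetters_spec : Claim_equal_countOddLetters := by
  intro n _
  unfold Spec_countOddLetters
  exact countOddLetters_eq_alt n
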